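-- pv_equiv track=rewrite | github.com/jakobfechner312/ETL | static_pipeline/transform/merge.py | _cluster_years
-- ===== SOURCE A (Python) =====
-- def _cluster_years(unique_years: list[int]) -> dict[int, int]:
--     clusters: list[list[int]] = []
--     mapping: dict[int, int] = {}
--     for y in sorted(unique_years):
--         placed = False
--         for cid, members in enumerate(clusters):
--             if any(abs(y - m) <= 1 for m in members):
--                 members.append(y)
--                 mapping[y] = cid
--                 placed = True
--                 break
--         if not placed:
--             clusters.append([y])
--             mapping[y] = len(clusters) - 1
--     return mapping
-- ===== SOURCE B (Python) =====
-- def _cluster_years(unique_years: list[int]) -> dict[int, int]: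
--     mapping: dict[int, int] = {}
--     cid = -1
--     prev = None
--     for y in sorted(unique_years):
--         if prev is None or y - prev > 1:
--             cid += 1
--         mapping[y] = cid
--         prev = y
--     return mapping
-- ===== Notes on version B (the rewrite author's own statement) =====
-- stated objective: faster
-- what changed: Replaced the quadratic scan over all existing clusters (with an inner membership/distance check per cluster) by a single pass over the sorted years that keeps only the previous year and a running cluster id, bumping the id when the gap exceeds 1.
import Mathlib
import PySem

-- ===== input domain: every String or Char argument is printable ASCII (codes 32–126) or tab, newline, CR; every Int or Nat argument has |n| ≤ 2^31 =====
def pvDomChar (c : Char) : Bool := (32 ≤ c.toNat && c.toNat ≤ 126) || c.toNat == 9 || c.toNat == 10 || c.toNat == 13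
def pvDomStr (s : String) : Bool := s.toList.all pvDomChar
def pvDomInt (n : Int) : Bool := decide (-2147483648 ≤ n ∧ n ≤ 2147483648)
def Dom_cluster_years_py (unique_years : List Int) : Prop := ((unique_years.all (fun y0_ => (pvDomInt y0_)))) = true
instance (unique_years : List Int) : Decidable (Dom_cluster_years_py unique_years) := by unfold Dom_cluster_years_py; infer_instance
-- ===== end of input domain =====

-- B replaces A's quadratic place-into-first-close-cluster scan by one sorted pass
-- with a running previous year and cluster id (objective: faster).

-- ===== PORT A =====
-- inner 'for cid, members in enumerate(clusters): if any(...): members.append(y); break'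
-- returns the updated clusters and the hit index, or none if no cluster matched.
def pvPlaceA (y : Int) : List (List Int) → Option (List (List Int) × Nat)
  | [] => none
  | members :: rest =>
    if members.any (fun m => decide (|y - m| ≤ 1)) then
      some ((members ++ [y]) :: rest, 0)
    else
      match pvPlaceA y rest with
      | some (rest', cid) => some (members :: rest', cid + 1)
      | none => none

def pvStepA (st : List (List Int) × PySem.Dict Int Int) (y : Int) :
    List (List Int) × PySem.Dict Int Int :=
  match pvPlaceA y st.1 with
  | some (clusters', cid) => (clusters', st.2.insert y (Int.ofNat cid))
  | none =>
      let clusters' := st.1 ++ [[y]]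
      (clusters', st.2.insert y ((clusters'.length : Int) - 1))

def cluster_years_py (unique_years : List Int) : List (Int × Int) :=
  (((PySem.List.sorted unique_years (fun x => x) false).foldl pvStepA
      ([], PySem.Dict.empty))).2.items

-- ===== PORT B =====
def pvStepB (st : PySem.Dict Int Int × Int × Option Int) (y : Int) :
    PySem.Dict Int Int × Int × Option Int :=
  let cid : Int :=
    match st.2.2 with
    | none => st.2.1 + 1
    | some p => if 1 < y - p then st.2.1 + 1 else st.2.1
  (st.1.insert y cid, cid, some y)

def cluster_years_py_alt (unique_years : List Int) : List (Int × Int) :=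
  (((PySem.List.sorted unique_years (fun x => x) false).foldl pvStepB
      (PySem.Dict.empty, -1, none))).1.items

-- ===== PRECONDITION & SPEC =====
def Spec_cluster_years_py (unique_years : List Int) (out : List (Int × Int)) : Prop := out = cluster_years_py_alt unique_years
instance (unique_years : List Int) (out : List (Int × Int)) : Decidable (Spec_cluster_years_py unique_years out) := by unfold Spec_cluster_years_py; infer_instance

-- ===== CLAIM (what is proved, stated in full; the proofs are below) =====
def Claim_equal_cluster_years_py : Prop := ∀ (unique_years : List Int), Dom_cluster_years_py unique_years → Spec_cluster_years_py unique_years (cluster_years_py unique_years)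

-- ===== LEMMAS AND PROOFS =====

-- A-state invariant after processing a sorted prefix ending at year p:
-- clusters = pre ++ [last], every member of an earlier cluster is > 1 below p,
-- p is in the last cluster and bounds it from above, and cid counts pre.
def pvInv (p : Int) (clusters : List (List Int)) (cid : Int) : Prop :=
  ∃ pre last, clusters = pre ++ [last] ∧
    (∀ c ∈ pre, ∀ m ∈ c, m + 1 < p) ∧
    p ∈ last ∧ (∀ m ∈ last, m ≤ p) ∧
    cid = (pre.length : Int)

lemma pvPlaceA_far (y : Int) (pre : List (List Int)) (last : List Int)
    (hfar : ∀ c ∈ pre, ∀ m ∈ c, m + 1 < y) :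
    pvPlaceA y (pre ++ [last]) =
      if last.any (fun m => decide (|y - m| ≤ 1)) then
        some (pre ++ [last ++ [y]], pre.length)
      else none := by
  induction pre with
  | nil =>
      by_cases h : last.any (fun m => decide (|y - m| ≤ 1)) = true
      · simp [pvPlaceA, h]
      · simp [pvPlaceA, h]
  | cons c cs ih =>
      have hc : c.any (fun m => decide (|y - m| ≤ 1)) = false := by
        simp only [List.any_eq_false]
        intro m hm
        have := hfar c (by simp) m hm
        simp [abs_le]; omega
      simp only [List.cons_append, pvPlaceA, hc, Bool.false_eq_true, if_false]
      rw [ih (fun c' hc' => hfar c' (by simp [hc']))]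
      by_cases h : last.any (fun m => decide (|y - m| ≤ 1)) = true
      · simp [h]
      · simp [h]

lemma pvAny_close (y p : Int) (last : List Int) (hp : p ∈ last)
    (hub : ∀ m ∈ last, m ≤ p) (hle : p ≤ y) :
    last.any (fun m => decide (|y - m| ≤ 1)) = decide (y - p ≤ 1) := by
  by_cases h : y - p ≤ 1
  · simp only [h, decide_true, List.any_eq_true]
    exact ⟨p, hp, by simp [abs_le]; omega⟩
  · simp only [h, decide_false, List.any_eq_false]
    intro m hm
    have := hub m hm
    simp [abs_le]; omega

lemma pvFold_eq (ys : List Int) : ∀ (p cid : Int) (clusters : List (List Int))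
    (d : PySem.Dict Int Int),
    (∀ y ∈ ys, p ≤ y) → List.Pairwise (· ≤ ·) ys → pvInv p clusters cid →
    (ys.foldl pvStepA (clusters, d)).2 = (ys.foldl pvStepB (d, cid, some p)).1 := by
  induction ys with
  | nil => intro p cid clusters d _ _ _; rfl
  | cons y ys ih =>
      intro p cid clusters d hge hpw hinv
      obtain ⟨pre, last, hcl, hfar, hp, hub, hcid⟩ := hinv
      have hpy : p ≤ y := hge y (by simp)
      have hplace : pvPlaceA y clusters =
          if last.any (fun m => decide (|y - m| ≤ 1)) then
            some (pre ++ [last ++ [y]], pre.length)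
          else none := by
        rw [hcl]
        exact pvPlaceA_far y pre last (fun c hc m hm => by
          have := hfar c hc m hm; omega)
      rw [hcl] at hplace
      have hany := pvAny_close y p last hp hub hpy
      have hpw' : List.Pairwise (· ≤ ·) ys := hpw.of_cons
      have hge' : ∀ z ∈ ys, y ≤ z := fun z hz => List.rel_of_pairwise_cons hpw hz
      by_cases hgap : 1 < y - p
      · -- new cluster
        have hany' : last.any (fun m => decide (|y - m| ≤ 1)) = false := by
          rw [hany]; simp; omega
        simp only [List.foldl_cons]
        have hA : pvStepA (clusters, d) y =
            (clusters ++ [[y]], d.insert y ((((clusters ++ [[y]]).length : Int)) - 1)) := by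
          simp [pvStepA, hcl, hplace, hany']
        have hB : pvStepB (d, cid, some p) y = (d.insert y (cid + 1), cid + 1, some y) := by
          simp [pvStepB, hgap]
        rw [hA, hB]
        have hval : (((clusters ++ [[y]]).length : Int)) - 1 = cid + 1 := by
          rw [hcl]; simp [hcid]; ring
        rw [hval]
        refine ih y (cid + 1) (clusters ++ [[y]]) _ hge' hpw' ?_
        refine ⟨pre ++ [last], [y], by simp [hcl], ?_, by simp, by simp, by simp [hcid]⟩
        intro c hc m hm
        rcases List.mem_append.mp hc with h | h
        · have := hfar c h m hm; omega
        · simp at h; subst h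
          have := hub m hm; omega
      · -- joins the last cluster
        have hany' : last.any (fun m => decide (|y - m| ≤ 1)) = true := by
          rw [hany]; simp; omega
        simp only [List.foldl_cons]
        have hA : pvStepA (clusters, d) y =
            (pre ++ [last ++ [y]], d.insert y (Int.ofNat pre.length)) := by
          simp [pvStepA, hcl, hplace, hany']
        have hB : pvStepB (d, cid, some p) y = (d.insert y cid, cid, some y) := by
          simp [pvStepB, hgap]
        rw [hA, hB]
        have hval : (Int.ofNat pre.length) = cid := by simp [hcid]
        rw [hval]
        refine ih y cid (pre ++ [last ++ [y]]) _ hge' hpw' ?_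
        refine ⟨pre, last ++ [y], rfl, ?_, by simp, ?_, hcid⟩
        · intro c hc m hm
          have := hfar c hc m hm; omega
        · intro m hm
          rcases List.mem_append.mp hm with h | h
          · have := hub m h; omega
          · simp at h; omega

-- ===== VERDICT (by name: the statement is the Claim_ definition above) =====
theorem cluster_years_py_spec : Claim_equal_cluster_years_py := by
  intro uy _
  unfold Spec_cluster_years_py cluster_years_py cluster_years_py_alt
  have hpw := PySem.List.sorted_pairwise (xs := uy) (key := fun x => x)
  cases hs : PySem.List.sorted uy (fun x => x) false with
  | nil => rfl
  | cons y ys =>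
      rw [hs] at hpw
      simp only [List.foldl_cons]
      have hA : pvStepA ([], PySem.Dict.empty) y =
          ([[y]], PySem.Dict.empty.insert y (((([[y]] : List (List Int)).length : Int)) - 1)) := by
        simp [pvStepA, pvPlaceA]
      have hB : pvStepB (PySem.Dict.empty, -1, none) y =
          (PySem.Dict.empty.insert y 0, 0, some y) := by
        simp [pvStepB]
      rw [hA, hB]
      have hval : ((([[y]] : List (List Int)).length : Int)) - 1 = (0 : Int) := by simp
      rw [hval]
      have := pvFold_eq ys y 0 [[y]] (PySem.Dict.empty.insert y 0)
        (fun z hz => List.rel_of_pairwise_cons hpw hz) hpw.of_cons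
        ⟨[], [y], by simp, by simp, by simp, by simp, by simp⟩
      rw [this]
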